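-- pv_equiv track=rewrite | github.com/BrenchCC/QuarkAgent-FromScratch | miniagent/agent.py | _extract_string_value
-- ===== SOURCE A (Python) =====
-- from typing import Any, Dict, List, Union, Callable, Optional
--
-- def _extract_string_value(text: str, quote_char: str) -> Optional[str]:
--     """
--     Extract a string value from text, handling escaped quotes
--
--     Args:
--         text: Text containing the string value
--         quote_char: Quote character used to enclose the string value
--
--     Returns:
--         Extracted string value if found, None otherwise
--     """
--     # Strategy: Find all potential ending positions and pick the best one
--     # A valid ending is: quote + optional whitespace + } or quote + optional whitespace + ,
--
--     # First try: find the last occurrence of "} or "}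
--     # This works because JSON object ends with }
--     best_end = -1
--     i = 0
--     while i < len(text):
--         if text[i] == '\\' and i + 1 < len(text):
--             i += 2
--             continue
--
--         if text[i] == quote_char:
--             rest = text[i + 1:].strip()
--             if rest.endswith('}') or rest.endswith(',}'):
--                 best_end = i
--
--                 # try to validate by checking if remaining text looks like end of JSON
--                 if rest.startswith('}'):
--                     # This looks like a good ending
--                     return text[:i]
--         i += 1
--
--     # If we found a potential end, use it
--     if best_end > 0:
--         return text[:best_end]
--
--     # Fallback: take everything up to the last quote before }
--     last_quote = text.rfind(quote_char)
--     if last_quote > 0: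
--         return text[:last_quote]
--
--     return None
-- ===== SOURCE B (Python) =====
-- from typing import Optional
--
-- def _extract_string_value(text: str, quote_char: str) -> Optional[str]:
--     # Two-phase: first collect all unescaped quote positions, then decide.
--     n = len(text)
--     positions = []
--     i = 0
--     while i < n:
--         if text[i] == '\\' and i + 1 < n:
--             i += 2
--             continue
--         if text[i] == quote_char:
--             positions.append(i)
--         i += 1
--
--     # Early winner: first quote whose stripped tail both starts and ends with '}'
--     for q in positions:
--         rest = text[q + 1:].strip()
--         if rest.endswith('}') and rest.startswith('}'):
--             return text[:q]
--
--     # Otherwise: the last quote whose stripped tail ends with '}'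
--     ending = [q for q in positions if text[q + 1:].strip().endswith('}')]
--     if ending and ending[-1] > 0:
--         return text[:ending[-1]]
--
--     # Fallback: everything up to the last occurrence of quote_char
--     last_quote = text.rfind(quote_char)
--     return text[:last_quote] if last_quote > 0 else None
-- ===== Notes on version B (the rewrite author's own statement) =====
-- stated objective: alternative
-- what changed: A's single interleaved scan (mutable best_end, early return inside the loop) is split into two phases: one pass collects all unescaped quote positions, then the decision is made on that list (first position whose stripped tail starts and ends with '}', else the last position ending with '}', else the rfind fallback).
import Mathlib
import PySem

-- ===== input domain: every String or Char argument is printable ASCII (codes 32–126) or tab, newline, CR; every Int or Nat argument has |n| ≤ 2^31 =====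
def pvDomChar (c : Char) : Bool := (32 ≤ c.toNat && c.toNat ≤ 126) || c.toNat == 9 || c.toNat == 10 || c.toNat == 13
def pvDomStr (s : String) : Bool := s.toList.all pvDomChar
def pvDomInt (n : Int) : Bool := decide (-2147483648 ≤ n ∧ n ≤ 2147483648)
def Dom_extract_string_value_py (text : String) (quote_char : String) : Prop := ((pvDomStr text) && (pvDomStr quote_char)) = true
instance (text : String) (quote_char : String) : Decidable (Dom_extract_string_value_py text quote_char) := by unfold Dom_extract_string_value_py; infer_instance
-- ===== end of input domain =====

-- B separates A's single interleaved scan into two phases: collect all unescaped quote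
-- positions once, then decide (first both-ends match, else last ends-with-'}' quote,
-- else rfind fallback); objective: alternative decomposition, same cost.


-- ===== PORT A =====
-- A's while loop: index i, mutable best_end; early return inside the endswith branch.
def pvALoop (l qc : List Char) (i : Nat) (best : Int) : Option String :=
  if h : i < l.length then
    if l[i] == '\\' && decide (i + 1 < l.length) then
      pvALoop l qc (i + 2) best
    else if [l[i]] == qc then
      let rest := PySem.Chars.strip (l.drop (i + 1))
      if PySem.Chars.endswith rest ['}'] || PySem.Chars.endswith rest [',', '}'] then
        if PySem.Chars.startswith rest ['}'] then some (String.ofList (l.take i))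
        else pvALoop l qc (i + 1) (i : Int)
      else pvALoop l qc (i + 1) best
    else pvALoop l qc (i + 1) best
  else
    if best > 0 then some (String.ofList (l.take best.toNat))
    else
      let last_quote := PySem.Chars.rfind l qc
      if last_quote > 0 then some (String.ofList (l.take last_quote.toNat)) else none
termination_by l.length - i

def extract_string_value_py (text : String) (quote_char : String) : Option String :=
  pvALoop text.toList quote_char.toList 0 (-1)

-- ===== PORT B =====
-- phase 1: all unescaped quote positions (same skip-by-2-on-backslash rule)
def pvQuotePos (l qc : List Char) (i : Nat) : List Nat :=
  if h : i < l.length then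
    if l[i] == '\\' && decide (i + 1 < l.length) then pvQuotePos l qc (i + 2)
    else if [l[i]] == qc then i :: pvQuotePos l qc (i + 1)
    else pvQuotePos l qc (i + 1)
  else []
termination_by l.length - i

def pvEndsQ (l : List Char) (q : Nat) : Bool :=
  PySem.Chars.endswith (PySem.Chars.strip (l.drop (q + 1))) ['}']

def pvGoodQ (l : List Char) (q : Nat) : Bool :=
  pvEndsQ l q && PySem.Chars.startswith (PySem.Chars.strip (l.drop (q + 1))) ['}']

def extract_string_value_py_alt (text : String) (quote_char : String) : Option String :=
  let l := text.toList
  let qc := quote_char.toList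
  let ps := pvQuotePos l qc 0
  match ps.find? (pvGoodQ l) with
  | some q => some (String.ofList (l.take q))
  | none =>
    match (ps.filter (pvEndsQ l)).getLast? with
    | some b =>
        if 0 < b then some (String.ofList (l.take b))
        else
          let last_quote := PySem.Chars.rfind l qc
          if last_quote > 0 then some (String.ofList (l.take last_quote.toNat)) else none
    | none =>
        let last_quote := PySem.Chars.rfind l qc
        if last_quote > 0 then some (String.ofList (l.take last_quote.toNat)) else none

-- ===== PRECONDITION & SPEC =====
def Spec_extract_string_value_py (text : String) (quote_char : String) (out : Option String) : Prop := out = extract_string_value_py_alt text quote_char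
instance (text : String) (quote_char : String) (out : Option String) : Decidable (Spec_extract_string_value_py text quote_char out) := by unfold Spec_extract_string_value_py; infer_instance

-- ===== CLAIM (what is proved, stated in full; the proofs are below) =====
def Claim_equal_extract_string_value_py : Prop := ∀ (text : String) (quote_char : String), Dom_extract_string_value_py text quote_char → Spec_extract_string_value_py text quote_char (extract_string_value_py text quote_char)

-- ===== LEMMAS AND PROOFS =====

-- B's decision phase, applied to a list of quote positions with A's running best.
def pvDecide (l qc : List Char) (ps : List Nat) (best : Int) : Option String :=
  match ps.find? (pvGoodQ l) with
  | some q => some (String.ofList (l.take q))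
  | none =>
    let b : Int := ((ps.filter (pvEndsQ l)).getLast?).elim best (fun q => (q : Int))
    if b > 0 then some (String.ofList (l.take b.toNat))
    else if PySem.Chars.rfind l qc > 0 then
      some (String.ofList (l.take (PySem.Chars.rfind l qc).toNat))
    else none

-- A tests endswith '}' OR endswith ',}'; the second implies the first.
lemma pvEnds_or (r : List Char) :
    (PySem.Chars.endswith r ['}'] || PySem.Chars.endswith r [',', '}']) =
      PySem.Chars.endswith r ['}'] := by
  by_cases h : PySem.Chars.endswith r [',', '}'] = true
  · have h' : (['}'] : List Char) <:+ r :=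
      List.IsSuffix.trans (by simp) ((PySem.Chars.endswith_iff _ _).mp h)
    simp [h, (PySem.Chars.endswith_iff _ _).mpr h']
  · simp [h]

lemma getLast?_cons_elim (a : Nat) (fr : List Nat) (best : Int) :
    ((a :: fr).getLast?).elim best (fun q => (q : Int)) =
      (fr.getLast?).elim (a : Int) (fun q => (q : Int)) := by
  cases fr with
  | nil => simp
  | cons b t =>
    rw [List.getLast?_cons_cons]
    cases h : (b :: t).getLast? with
    | none => simp at h
    | some x => simp

lemma pvDecide_nil (l qc : List Char) (best : Int) :
    pvDecide l qc [] best =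
      if best > 0 then some (String.ofList (l.take best.toNat))
      else if PySem.Chars.rfind l qc > 0 then
        some (String.ofList (l.take (PySem.Chars.rfind l qc).toNat))
      else none := rfl

lemma pvDecide_cons_good (l qc : List Char) (ps : List Nat) (i : Nat) (best : Int)
    (hg : pvGoodQ l i = true) :
    pvDecide l qc (i :: ps) best = some (String.ofList (l.take i)) := by
  unfold pvDecide
  rw [List.find?_cons_of_pos hg]

lemma pvDecide_cons_end (l qc : List Char) (ps : List Nat) (i : Nat) (best : Int)
    (hg : pvGoodQ l i = false) (he : pvEndsQ l i = true) :
    pvDecide l qc (i :: ps) best = pvDecide l qc ps (i : Int) := by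
  unfold pvDecide
  rw [List.find?_cons_of_neg (by simp [hg]), List.filter_cons_of_pos he,
    getLast?_cons_elim]

lemma pvDecide_cons_no (l qc : List Char) (ps : List Nat) (i : Nat) (best : Int)
    (he : pvEndsQ l i = false) :
    pvDecide l qc (i :: ps) best = pvDecide l qc ps best := by
  have hg : pvGoodQ l i = false := by simp [pvGoodQ, he]
  unfold pvDecide
  rw [List.find?_cons_of_neg (by simp [hg]), List.filter_cons_of_neg (by simp [he])]

-- A's loop is B's decision phase over the remaining quote positions.
lemma pvALoop_eq (l qc : List Char) :
    ∀ (n i : Nat) (best : Int), l.length ≤ i + n →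
      pvALoop l qc i best = pvDecide l qc (pvQuotePos l qc i) best := by
  intro n
  induction n with
  | zero =>
    intro i best hn
    have h : ¬ i < l.length := by omega
    rw [pvALoop, pvQuotePos, dif_neg h, dif_neg h, pvDecide_nil]
  | succ n ih =>
    intro i best hn
    rw [pvALoop, pvQuotePos]
    by_cases h : i < l.length
    · rw [dif_pos h, dif_pos h]
      by_cases hbs : (l[i]'h == '\\' && decide (i + 1 < l.length)) = true
      · rw [if_pos hbs, if_pos hbs]
        exact ih (i + 2) best (by omega)
      · rw [if_neg hbs, if_neg hbs]
        by_cases hq : ([l[i]'h] == qc) = true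
        · rw [if_pos hq, if_pos hq]
          by_cases hend :
              (PySem.Chars.endswith (PySem.Chars.strip (l.drop (i + 1))) ['}'] ||
                PySem.Chars.endswith (PySem.Chars.strip (l.drop (i + 1))) [',', '}']) = true
          · have he : pvEndsQ l i = true := by
              unfold pvEndsQ; rw [← pvEnds_or]; exact hend
            rw [if_pos hend]
            by_cases hst :
                PySem.Chars.startswith (PySem.Chars.strip (l.drop (i + 1))) ['}'] = true
            · rw [if_pos hst, pvDecide_cons_good l qc _ i best (by simp [pvGoodQ, he, hst])]
            · have hg : pvGoodQ l i = false := by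
                simp only [pvGoodQ, he, Bool.true_and]; simpa using hst
              rw [if_neg hst, pvDecide_cons_end l qc _ i best hg he]
              exact ih (i + 1) (i : Int) (by omega)
          · have he : pvEndsQ l i = false := by
              unfold pvEndsQ; rw [← pvEnds_or]; simpa using hend
            rw [if_neg hend, pvDecide_cons_no l qc _ i best he]
            exact ih (i + 1) best (by omega)
        · rw [if_neg hq, if_neg hq]
          exact ih (i + 1) best (by omega)
    · rw [dif_neg h, dif_neg h, pvDecide_nil]

-- ===== VERDICT (by name: the statement is the Claim_ definition above) =====
theorem extract_string_value_py_spec : Claim_equal_extract_string_value_py := by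
  intro text quote_char _
  unfold Spec_extract_string_value_py extract_string_value_py extract_string_value_py_alt
  rw [pvALoop_eq text.toList quote_char.toList text.toList.length 0 (-1) (by omega)]
  unfold pvDecide
  cases hf : (pvQuotePos text.toList quote_char.toList 0).find? (pvGoodQ text.toList) with
  | some q => simp [hf]
  | none =>
    simp only [hf]
    cases hl : ((pvQuotePos text.toList quote_char.toList 0).filter
        (pvEndsQ text.toList)).getLast? with
    | none => simp
    | some b =>
      simp only [Option.elim_some]
      by_cases hb : 0 < b
      · have hbi : ((b : Int) > 0) := by exact_mod_cast hb
        simp [hb]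
      · have hbi : ¬ ((b : Int) > 0) := by omega
        simp [hb]
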